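-- pv_equiv track=rewrite | github.com/nSmyser/capstone-ai-security-assistant | app.py | trim_messages
-- ===== SOURCE A (Python) =====
-- from typing import Optional, List, Dict, Tuple
--
-- MAX_MESSAGES = 24            # keep at most this many messages in the payload we send to the model
--
-- MAX_TOTAL_CHARS = 14_000    # approximate safe total characters for messages payload
--
-- MAX_MESSAGE_CHARS = 3_000   # trim any single message to this many characters
--
-- def trim_messages(messages: List[dict]) -> List[dict]:
--     """
--     Trim a list of messages to keep the most recent messages while respecting
--     MAX_MESSAGES and MAX_TOTAL_CHARS. Also trim individual messages to MAX_MESSAGE_CHARS.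
--     Returns a new list (not in-place).
--     """
--     if not messages:
--         return messages
--
--     msgs = messages[-MAX_MESSAGES:]  # keep last N first
--     # trim individual message sizes (preserve role tag)
--     def trim_msg(m):
--         content = m.get("content", "")
--         if len(content) > MAX_MESSAGE_CHARS:
--             # keep tail (most recent) since context usually matters more recently
--             content = content[-MAX_MESSAGE_CHARS:]
--         return {"role": m.get("role", "user"), "content": content}
--
--     msgs = [trim_msg(m) for m in msgs]
--
--     # if total chars still too big, drop oldest until under limit
--     total_chars = sum(len(m["content"]) for m in msgs)
--     while total_chars > MAX_TOTAL_CHARS and len(msgs) > 1: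
--         # drop the oldest message
--         msgs.pop(0)
--         total_chars = sum(len(m["content"]) for m in msgs)
--
--     return msgs
-- ===== SOURCE B (Python) =====
-- MAX_MESSAGES = 24
-- MAX_TOTAL_CHARS = 14_000
-- MAX_MESSAGE_CHARS = 3_000
--
-- def trim_messages(messages):
--     if not messages:
--         return messages
--     msgs = []
--     for m in messages[-MAX_MESSAGES:]:
--         content = m.get("content", "")
--         if len(content) > MAX_MESSAGE_CHARS:
--             content = content[-MAX_MESSAGE_CHARS:]
--         msgs.append({"role": m.get("role", "user"), "content": content})
--     # one backward pass: count how many trailing messages fit in the char budget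
--     total = 0
--     keep = 0
--     for m in reversed(msgs):
--         n = len(m["content"])
--         if total + n > MAX_TOTAL_CHARS:
--             break
--         total += n
--         keep += 1
--     if keep == 0:
--         keep = 1  # always retain at least the newest message
--     return msgs[-keep:]
-- ===== Notes on version B (the rewrite author's own statement) =====
-- stated objective: alternative
-- what changed: Replaces A's drop-oldest while loop, which re-sums all remaining content lengths after every pop, with a single backward pass that counts how many trailing messages fit in the char budget (clamped to at least 1) and returns that suffix slice.
import Mathlib
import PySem

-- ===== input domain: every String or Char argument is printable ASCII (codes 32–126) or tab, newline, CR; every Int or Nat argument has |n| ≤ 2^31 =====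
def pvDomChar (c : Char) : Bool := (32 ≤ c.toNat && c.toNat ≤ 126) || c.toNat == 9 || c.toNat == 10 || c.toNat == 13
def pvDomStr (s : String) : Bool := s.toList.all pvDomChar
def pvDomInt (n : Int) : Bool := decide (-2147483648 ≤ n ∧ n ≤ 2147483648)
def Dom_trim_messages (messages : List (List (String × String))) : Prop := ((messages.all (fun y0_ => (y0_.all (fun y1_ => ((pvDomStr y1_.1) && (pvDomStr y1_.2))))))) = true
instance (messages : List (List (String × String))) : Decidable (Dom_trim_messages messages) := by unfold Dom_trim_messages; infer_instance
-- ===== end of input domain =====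

-- B replaces A's repeated drop-oldest-and-resum while loop by a single backward pass that
-- counts how many trailing messages fit in the char budget; equal return values are proved.

-- ===== PORT A =====
-- m.get(k, dflt) on the association-list dict
def pvGetA (m : List (String × String)) (k dflt : String) : String :=
  PySem.Dict.getD (PySem.Dict.mk m) k dflt

-- inner helper trim_msg
def pvTrimMsgA (m : List (String × String)) : List (String × String) :=
  let content := pvGetA m "content" ""
  let content := if PySem.Str.len content > 3000
                 then PySem.Str.slice content (some (-3000)) none else content
  [("role", pvGetA m "role" "user"), ("content", content)]

-- total_chars = sum(len(m["content"]) for m in msgs); after trim_msg the key is always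
-- present, so the dict lookup with default "" is exact on every reachable state
def pvTotalCharsA (msgs : List (List (String × String))) : Int :=
  (msgs.map (fun m => PySem.Str.len (pvGetA m "content" ""))).sum

-- the while loop: drop the head while total > 14000 and more than one message remains
def pvDropLoopA (msgs : List (List (String × String))) : List (List (String × String)) :=
  match msgs with
  | [] => []
  | m :: rest =>
    if pvTotalCharsA (m :: rest) > 14000 ∧ rest ≠ [] then pvDropLoopA rest else m :: rest

def trim_messages (messages : List (List (String × String))) : List (List (String × String)) :=
  if messages = [] then messages
  else
    let msgs := PySem.List.slice messages (some (-24)) none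
    let msgs := msgs.map pvTrimMsgA
    pvDropLoopA msgs

-- ===== PORT B =====
def pvGetB (m : List (String × String)) (k dflt : String) : String :=
  PySem.Dict.getD (PySem.Dict.mk m) k dflt

def pvTrimMsgB (m : List (String × String)) : List (String × String) :=
  let content := pvGetB m "content" ""
  let content := if PySem.Str.len content > 3000
                 then PySem.Str.slice content (some (-3000)) none else content
  [("role", pvGetB m "role" "user"), ("content", content)]

-- the backward for-loop with break, over reversed(msgs), carrying (total, keep)
def pvCountKeepB (rev : List (List (String × String))) (total keep : Int) : Int :=
  match rev with
  | [] => keep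
  | m :: t =>
    let n := PySem.Str.len (pvGetB m "content" "")
    if total + n > 14000 then keep else pvCountKeepB t (total + n) (keep + 1)

def trim_messages_alt (messages : List (List (String × String))) : List (List (String × String)) :=
  if messages = [] then messages
  else
    let msgs := (PySem.List.slice messages (some (-24)) none).map pvTrimMsgB
    let keep := pvCountKeepB msgs.reverse 0 0
    let keep := if keep = 0 then 1 else keep
    PySem.List.slice msgs (some (-keep)) none

-- ===== PRECONDITION & SPEC =====
def Spec_trim_messages (messages : List (List (String × String))) (out : List (List (String × String))) : Prop := out = trim_messages_alt messages
instance (messages : List (List (String × String))) (out : List (List (String × String))) : Decidable (Spec_trim_messages messages out) := by unfold Spec_trim_messages; infer_instance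

-- ===== CLAIM (what is proved, stated in full; the proofs are below) =====
def Claim_equal_trim_messages : Prop := ∀ (messages : List (List (String × String))), Dom_trim_messages messages → Spec_trim_messages messages (trim_messages messages)

-- ===== LEMMAS AND PROOFS =====

-- content length of a (trimmed) message, shared vocabulary of the lemmas
def pvCLen (m : List (String × String)) : Int := PySem.Str.len (pvGetB m "content" "")

def pvSumL (l : List (List (String × String))) : Int := (l.map pvCLen).sum

-- proof-side Nat version of B's backward counter
def pvCountFit (rev : List (List (String × String))) (total : Int) : Nat :=
  match rev with
  | [] => 0
  | m :: t => if total + pvCLen m > 14000 then 0 else 1 + pvCountFit t (total + pvCLen m)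

lemma countKeep_eq_countFit (rev : List (List (String × String))) (total keep : Int) :
    pvCountKeepB rev total keep = keep + (pvCountFit rev total : Int) := by
  induction rev generalizing total keep with
  | nil => simp [pvCountKeepB, pvCountFit]
  | cons m t ih =>
    simp only [pvCountKeepB, pvCountFit, pvCLen]
    split
    · simp
    · rw [ih]; push_cast; ring

lemma countFit_le_length (rev : List (List (String × String))) (total : Int) :
    pvCountFit rev total ≤ rev.length := by
  induction rev generalizing total with
  | nil => simp [pvCountFit]
  | cons m t ih =>
    simp only [pvCountFit, List.length_cons]
    split
    · omega
    · have := ih (total + pvCLen m); omega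

lemma cLen_nonneg (m : List (String × String)) : 0 ≤ pvCLen m := by
  rw [pvCLen, PySem.Str.len_eq]; positivity

lemma sumL_nonneg (l : List (List (String × String))) : 0 ≤ pvSumL l := by
  apply List.sum_nonneg; intro x hx
  simp only [List.mem_map] at hx
  obtain ⟨y, _, rfl⟩ := hx
  exact cLen_nonneg y

lemma countFit_full (rev : List (List (String × String))) (total : Int)
    (h : total + pvSumL rev ≤ 14000) :
    pvCountFit rev total = rev.length := by
  induction rev generalizing total with
  | nil => simp [pvCountFit]
  | cons m t ih =>
    simp only [pvSumL, List.map_cons, List.sum_cons] at h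
    have hnn : 0 ≤ pvSumL t := sumL_nonneg t
    simp only [pvCountFit, List.length_cons]
    rw [if_neg (by simp only [pvSumL] at hnn ⊢; omega), ih]
    · omega
    · simp only [pvSumL]; omega

lemma countFit_append_lt (l : List (List (String × String))) (x : List (String × String)) (total : Int)
    (hlt : pvCountFit l total < l.length) :
    pvCountFit (l ++ [x]) total = pvCountFit l total := by
  induction l generalizing total with
  | nil => simp at hlt
  | cons m t ih =>
    simp only [pvCountFit, List.cons_append, List.length_cons] at *
    split at hlt <;> rename_i hc
    · simp [hc]
    · simp only [if_neg hc]
      rw [ih (total + pvCLen m) (by omega)]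

lemma countFit_append_full (l : List (List (String × String))) (x : List (String × String)) (total : Int)
    (h : pvCountFit l total = l.length) :
    pvCountFit (l ++ [x]) total
      = l.length + (if total + pvSumL l + pvCLen x > 14000 then 0 else 1) := by
  induction l generalizing total with
  | nil => simp [pvCountFit, pvSumL]
  | cons m t ih =>
    simp only [pvCountFit, List.length_cons] at h
    split at h <;> rename_i hc
    · omega
    · simp only [pvCountFit, List.cons_append, List.length_cons, if_neg hc]
      rw [ih _ (by omega)]
      have : total + pvSumL (m :: t) = total + pvCLen m + pvSumL t := by
        simp only [pvSumL, List.map_cons, List.sum_cons]; ring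
      rw [this]
      omega

-- A's total is B's content-length sum taken over the reversed list
lemma totalChars_eq (msgs : List (List (String × String))) :
    pvTotalCharsA msgs = pvSumL msgs.reverse := by
  unfold pvTotalCharsA pvSumL pvCLen pvGetB pvGetA
  rw [List.map_reverse, List.sum_reverse]

-- characterisation of A's while loop as a suffix of the trimmed list
lemma dropLoop_eq_drop (msgs : List (List (String × String))) (hne : msgs ≠ []) :
    pvDropLoopA msgs = msgs.drop (msgs.length - max (pvCountFit msgs.reverse 0) 1) := by
  induction msgs with
  | nil => exact absurd rfl hne
  | cons m rest ih =>
    by_cases hbig : pvTotalCharsA (m :: rest) > 14000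
    · by_cases hr : rest = []
      · subst hr
        simp only [pvDropLoopA, hbig, ne_eq, not_true_eq_false, and_false, if_false]
        have h1 : pvCountFit [m].reverse 0 ≤ 1 := by
          simpa using countFit_le_length [m].reverse 0
        interval_cases h : pvCountFit [m].reverse 0 <;> simp
      · have hrev : (m :: rest).reverse = rest.reverse ++ [m] := by simp
        have hsum : pvSumL rest.reverse + pvCLen m > 14000 := by
          have := totalChars_eq (m :: rest)
          rw [hrev] at this
          simp only [pvSumL, List.map_append, List.sum_append, List.map_cons,
            List.map_nil, List.sum_cons, List.sum_nil] at this
          simp only [pvSumL]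
          omega
        have hk : pvCountFit (m :: rest).reverse 0 = pvCountFit rest.reverse 0 := by
          rw [hrev]
          rcases lt_or_eq_of_le (countFit_le_length rest.reverse 0) with hlt | heq
          · exact countFit_append_lt _ _ _ hlt
          · rw [countFit_append_full _ _ _ heq, if_pos (by omega)]
            omega
        have hk' : pvCountFit rest.reverse 0 ≤ rest.length := by
          simpa using countFit_le_length rest.reverse 0
        have hrl : 1 ≤ rest.length := by
          cases rest with
          | nil => exact absurd rfl hr
          | cons a b => simp
        simp only [pvDropLoopA]
        rw [if_pos (show pvTotalCharsA (m :: rest) > 14000 ∧ rest ≠ [] from ⟨hbig, hr⟩)]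
        rw [ih hr, hk]
        have : (m :: rest).length - max (pvCountFit rest.reverse 0) 1
            = (rest.length - max (pvCountFit rest.reverse 0) 1) + 1 := by
          simp only [List.length_cons]; omega
        rw [this, List.drop_succ_cons]
    · simp only [pvDropLoopA, hbig, false_and, if_false]
      have hfull : pvCountFit (m :: rest).reverse 0 = (m :: rest).length := by
        rw [← List.length_reverse]
        apply countFit_full
        rw [← totalChars_eq]
        omega
      rw [hfull]
      simp

-- the two per-message trimmers are the same function
lemma trimMsg_eq : pvTrimMsgA = pvTrimMsgB := rfl

lemma trim_eq (messages : List (List (String × String))) :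
    trim_messages messages = trim_messages_alt messages := by
  by_cases hmt : messages = []
  · simp [trim_messages, trim_messages_alt, hmt]
  · set msgs := (PySem.List.slice messages (some (-24)) none).map pvTrimMsgA with hmsgs
    have hne : msgs ≠ [] := by
      rw [hmsgs, PySem.List.slice_from_neg_ofNat messages 24 (by omega)]
      simp only [ne_eq, List.map_eq_nil_iff, List.drop_eq_nil_iff, not_le]
      cases messages with
      | nil => exact absurd rfl hmt
      | cons a b => simp only [List.length_cons]; omega
    have hA : trim_messages messages = pvDropLoopA msgs := by
      simp only [trim_messages, if_neg hmt, ← hmsgs]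
    have hB : trim_messages_alt messages
        = PySem.List.slice msgs
            (some (-(if pvCountKeepB msgs.reverse 0 0 = 0 then 1 else pvCountKeepB msgs.reverse 0 0)))
            none := by
      simp only [trim_messages_alt, if_neg hmt, ← trimMsg_eq, ← hmsgs]
    rw [hA, hB, countKeep_eq_countFit]
    set k := pvCountFit msgs.reverse 0 with hkdef
    have hcast : (if (0:Int) + (k:Int) = 0 then 1 else (0:Int) + (k:Int)) = ((max k 1 : Nat) : Int) := by
      by_cases hk0 : k = 0
      · simp [hk0]
      · rw [if_neg (by omega)]
        push_cast
        omega
    rw [hcast, PySem.List.slice_from_neg_natCast msgs (max k 1) (by omega)]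
    exact dropLoop_eq_drop msgs hne

-- ===== VERDICT (by name: the statement is the Claim_ definition above) =====
theorem trim_messages_spec : Claim_equal_trim_messages := by
  intro messages _
  unfold Spec_trim_messages
  exact trim_eq messages
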